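-- pv_equiv track=rewrite | github.com/Unstructured-IO/unstructured-eval-metrics | src/processing/table_processing.py | _assign_cells_to_rows
-- ===== SOURCE A (Python) =====
-- def _assign_cells_to_rows(cells):
--     rows = {}
--
--     for cell in cells:
--         row_index = cell.get("row_index")
--         if row_index not in rows:
--             rows[row_index] = []
--         rows[row_index].append(cell)
--
--     # sort row cells
--     for row in rows.values():
--         row.sort(key=lambda x: x["col_index"])
--
--     return rows
-- ===== SOURCE B (Python) =====
-- def _assign_cells_to_rows(cells):
--     # Different decomposition: no incremental dict of buckets. First collect the
--     # distinct row keys in first-appearance order, then build the result in one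
--     # comprehension, selecting and sorting each row's cells directly.
--     order = []
--     for cell in cells:
--         ri = cell.get("row_index")
--         if ri not in order:
--             order.append(ri)
--     return {ri: sorted((c for c in cells if c.get("row_index") == ri),
--                        key=lambda c: c["col_index"])
--             for ri in order}
-- ===== Notes on version B (the rewrite author's own statement) =====
-- stated objective: alternative
-- what changed: B builds no dict of growing buckets: it collects the distinct row keys in first-appearance order and then produces the result as one comprehension that filters the cells of each row and sorts that selection, instead of A's fold-into-dict pass followed by an in-place sort of every bucket.
-- outside the precondition, e.g. on _assign_cells_to_rows([{'col_index': 1}]): A returns {None: [{'col_index': 1}]}, B returns {None: [{'col_index': 1}]}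
import Mathlib
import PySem

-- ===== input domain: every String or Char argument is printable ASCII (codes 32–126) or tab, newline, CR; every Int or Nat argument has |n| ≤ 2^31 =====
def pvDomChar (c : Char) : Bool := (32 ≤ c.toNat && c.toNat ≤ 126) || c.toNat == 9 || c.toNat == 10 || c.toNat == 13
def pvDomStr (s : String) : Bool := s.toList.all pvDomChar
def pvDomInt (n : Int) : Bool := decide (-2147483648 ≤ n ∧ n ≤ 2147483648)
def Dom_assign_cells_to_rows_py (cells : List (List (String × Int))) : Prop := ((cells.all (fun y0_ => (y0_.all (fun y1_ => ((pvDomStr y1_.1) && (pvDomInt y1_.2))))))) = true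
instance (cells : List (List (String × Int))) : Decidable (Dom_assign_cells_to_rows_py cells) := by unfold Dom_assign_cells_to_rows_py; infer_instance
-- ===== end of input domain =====

-- B replaces A's fold-into-dict-then-sort-each-bucket by a two-stage comprehension: collect the
-- distinct row keys in first-appearance order, then filter and sort each row's cells directly.


-- ===== PORT A =====
-- cell.get("row_index") / cell["col_index"]: first-match lookup in the cell dict; the `.getD 0`
-- only totalizes the Lean function outside Pre_ (inside Pre_ both keys are present).
def pvRowIdx (cell : List (String × Int)) : Int :=
  ((PySem.Dict.mk cell).get? "row_index").getD 0

def pvColIdx (cell : List (String × Int)) : Int :=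
  ((PySem.Dict.mk cell).get? "col_index").getD 0

def assign_cells_to_rows_py (cells : List (List (String × Int))) : List (Int × List (List (String × Int))) :=
  -- for cell in cells: if row_index not in rows: rows[row_index] = []; rows[row_index].append(cell)
  let rows : PySem.Dict Int (List (List (String × Int))) :=
    cells.foldl (fun rows cell =>
      let ri := pvRowIdx cell
      let rows := if rows.contains ri then rows else rows.insert ri []
      rows.modify ri [] (fun v => v ++ [cell])) PySem.Dict.empty
  -- for row in rows.values(): row.sort(key=lambda x: x["col_index"])
  rows.items.map (fun p => (p.1, PySem.List.sorted p.2 pvColIdx false))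

-- ===== PORT B =====
def assign_cells_to_rows_py_alt (cells : List (List (String × Int))) : List (Int × List (List (String × Int))) :=
  -- order = []; for cell in cells: if ri not in order: order.append(ri)
  let order : PySem.Set Int :=
    cells.foldl (fun s cell => PySem.Set.add s (pvRowIdx cell)) PySem.Set.empty
  -- {ri: sorted((c for c in cells if c.get("row_index") == ri), key=col) for ri in order}
  order.map (fun ri =>
    (ri, PySem.List.sorted (cells.filter (fun c => pvRowIdx c == ri)) pvColIdx false))

-- ===== PRECONDITION & SPEC =====
-- Pre_ excludes cells without a "row_index" key — there A returns a dict keyed by None, which is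
-- not a value of the declared return type List (Int × …) (B returns the same None-keyed dict) —
-- and cells without a "col_index" key, on which both A and B raise KeyError while sorting.
def Pre_assign_cells_to_rows_py (cells : List (List (String × Int))) : Prop :=
  ∀ cell ∈ cells, (PySem.Dict.mk cell).contains "row_index" = true ∧
    (PySem.Dict.mk cell).contains "col_index" = true
instance (cells : List (List (String × Int))) : Decidable (Pre_assign_cells_to_rows_py cells) := by
  unfold Pre_assign_cells_to_rows_py; infer_instance

def pvWitness_assign_cells_to_rows_py : (List (List (String × Int))) :=
  [[("row_index", 0), ("col_index", 2)], [("row_index", 1), ("col_index", 0)],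
   [("row_index", 0), ("col_index", 1)]]

def Spec_assign_cells_to_rows_py (cells : List (List (String × Int))) (out : List (Int × List (List (String × Int)))) : Prop := out = assign_cells_to_rows_py_alt cells
instance (cells : List (List (String × Int))) (out : List (Int × List (List (String × Int)))) : Decidable (Spec_assign_cells_to_rows_py cells out) := by unfold Spec_assign_cells_to_rows_py; infer_instance

-- ===== CLAIM (what is proved, stated in full; the proofs are below) =====
def Claim_equal_assign_cells_to_rows_py : Prop := ∀ (cells : List (List (String × Int))), Dom_assign_cells_to_rows_py cells → Pre_assign_cells_to_rows_py cells → Spec_assign_cells_to_rows_py cells (assign_cells_to_rows_py cells)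

-- ===== LEMMAS AND PROOFS =====

-- A's loop body is exactly a modify
theorem pv_step_eq_modify {ν : Type} (d : PySem.Dict Int ν) (ri : Int) (dflt : ν) (f : ν → ν) :
    ((if d.contains ri then d else d.insert ri dflt).modify ri dflt f) = d.modify ri dflt f := by
  by_cases h : d.contains ri = true
  · simp [h]
  · have hc : d.contains ri = false := by simpa using h
    rw [if_neg h]
    simp only [PySem.Dict.modify, PySem.Dict.getD_insert_self, PySem.Dict.insert_insert_self]
    rw [PySem.Dict.getD_of_not_contains]
    exact hc

theorem pv_foldlA_eq (cells : List (List (String × Int)))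
    (d : PySem.Dict Int (List (List (String × Int)))) :
    cells.foldl (fun rows cell =>
        (if rows.contains (pvRowIdx cell) then rows
         else rows.insert (pvRowIdx cell) []).modify (pvRowIdx cell) [] (fun v => v ++ [cell])) d
      = cells.foldl (fun rows cell =>
          rows.modify (pvRowIdx cell) [] (fun v => v ++ [cell])) d := by
  induction cells generalizing d with
  | nil => rfl
  | cons c cs ih =>
    simp only [List.foldl_cons]
    rw [pv_step_eq_modify]
    exact ih _

theorem pv_getD_modify_fold (l : List (List (String × Int)))
    (d : PySem.Dict Int (List (List (String × Int)))) (kk : Int) :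
    (l.foldl (fun rows cell => rows.modify (pvRowIdx cell) [] (fun v => v ++ [cell])) d).getD kk []
      = d.getD kk [] ++ l.filter (fun c => pvRowIdx c == kk) := by
  have hmap : l.foldl (fun rows cell => rows.modify (pvRowIdx cell) [] (fun v => v ++ [cell])) d
      = (l.map (fun c => (pvRowIdx c, c))).foldl
          (fun rows p => rows.modify p.1 [] (fun v => v ++ [p.2])) d := by
    rw [List.foldl_map]
  rw [hmap, PySem.Dict.getD_foldl_modify_append, List.filter_map]
  simp [Function.comp_def]

-- ===== VERDICT (by name: the statement is the Claim_ definition above) =====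
theorem assign_cells_to_rows_py_spec : Claim_equal_assign_cells_to_rows_py := by
  intro cells _ _
  unfold Spec_assign_cells_to_rows_py assign_cells_to_rows_py assign_cells_to_rows_py_alt
  simp only []
  rw [pv_foldlA_eq]
  set dA := cells.foldl (fun rows cell =>
      rows.modify (pvRowIdx cell) [] (fun v => v ++ [cell])) PySem.Dict.empty with hdA
  have hkA : dA.keys = PySem.Set.ofList (cells.map pvRowIdx) := by
    rw [hdA, PySem.Dict.keys_foldl_modify_key]
    simp [PySem.Set.update_nil_left]
  have hndA : dA.keys.Nodup := by
    rw [hdA]; exact PySem.Dict.nodup_keys_foldl_modify_key _ _ _ _ _ (by simp)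
  have hgA : ∀ kk, dA.getD kk [] = cells.filter (fun c => pvRowIdx c == kk) := by
    intro kk
    rw [hdA, pv_getD_modify_fold]
    simp
  have horder : cells.foldl (fun s cell => PySem.Set.add s (pvRowIdx cell)) PySem.Set.empty
      = PySem.Set.ofList (cells.map pvRowIdx) := by
    rw [PySem.Set.ofList_eq_foldl, List.foldl_map]; rfl
  rw [horder, PySem.Dict.items_eq_map_keys dA hndA [], List.map_map, hkA]
  refine List.map_congr_left ?_
  intro kk _
  simp only [Function.comp, hgA kk]
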